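-- pv_equiv track=rewrite | github.com/JunseoKim19/Structure-from-WiFi | Occupancy_Grid_Map_raycasting.py | supercover_line
-- ===== SOURCE A (Python) =====
-- def supercover_line(x0, y0, x1, y1):
--     points = []
--     dx = x1 - x0
--     dy = y1 - y0
--
--     xsign = 1 if dx > 0 else -1
--     ysign = 1 if dy > 0 else -1
--
--     dx = abs(int(x1 - x0))
--     dy = abs(int(y1 - y0))
--
--     if dx > dy:
--         xx, xy, yx, yy = xsign, 0, 0, ysign
--     else:
--         dx, dy = dy, dx
--         xx, xy, yx, yy = 0, ysign, xsign, 0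
--
--     D = 2*dy - dx
--     y = 0
--
--     for x in range(dx + 1):
--         points.append((x0 + x*xx + y*yx, y0 + x*xy + y*yy))
--         if D >= 0:
--             y += 1
--             D -= 2*dx
--         D += 2*dy
--
--     return points
-- ===== SOURCE B (Python) =====
-- def supercover_line(x0, y0, x1, y1):
--     # B: same sign/swap setup as A, but each point's transverse coordinate is
--     # computed in closed form by integer rounding instead of Bresenham's
--     # accumulated error term.
--     dx = x1 - x0
--     dy = y1 - y0
--     xsign = 1 if dx > 0 else -1
--     ysign = 1 if dy > 0 else -1
--     dx = abs(dx)
--     dy = abs(dy)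
--     if dx > dy:
--         xx, xy, yx, yy = xsign, 0, 0, ysign
--     else:
--         dx, dy = dy, dx
--         xx, xy, yx, yy = 0, ysign, xsign, 0
--     if dx == 0:
--         return [(x0, y0)]
--     return [(x0 + x*xx + ((2*x*dy + dx) // (2*dx))*yx,
--              y0 + x*xy + ((2*x*dy + dx) // (2*dx))*yy)
--             for x in range(dx + 1)]
-- ===== Notes on version B (the rewrite author's own statement) =====
-- stated objective: alternative
-- what changed: Replaced Bresenham's stateful error-term loop (accumulator D and stepped y) by a stateless per-point closed form y = (2*x*dy + dx) // (2*dx), so each point is computed independently by integer rounding.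
import Mathlib
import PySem

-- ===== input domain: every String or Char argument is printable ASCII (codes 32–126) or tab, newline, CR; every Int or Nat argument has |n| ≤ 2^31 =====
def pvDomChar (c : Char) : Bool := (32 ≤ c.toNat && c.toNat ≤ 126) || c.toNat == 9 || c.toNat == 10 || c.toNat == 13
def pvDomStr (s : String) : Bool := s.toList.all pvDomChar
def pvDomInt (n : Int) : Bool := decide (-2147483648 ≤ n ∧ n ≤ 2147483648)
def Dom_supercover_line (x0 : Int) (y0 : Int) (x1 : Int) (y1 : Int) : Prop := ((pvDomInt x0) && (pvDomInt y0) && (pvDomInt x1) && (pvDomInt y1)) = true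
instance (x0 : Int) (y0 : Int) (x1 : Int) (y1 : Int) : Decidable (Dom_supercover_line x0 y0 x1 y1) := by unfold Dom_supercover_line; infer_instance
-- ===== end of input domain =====

-- B keeps A's sign/swap setup but replaces Bresenham's stateful error-term loop by a
-- stateless per-point closed form y = (2*x*dy + dx) // (2*dx); return values proved equal.

-- ===== PORT A =====
-- loop body of A's 'for x in range(dx+1)': state = (points, D, y)
def pvAstep (x0 y0 xx xy yx yy dx dy : Int)
    (st : List (Int × Int) × Int × Int) (x : Int) : List (Int × Int) × Int × Int :=
  let points := st.1 ++ [(x0 + x * xx + st.2.2 * yx, y0 + x * xy + st.2.2 * yy)]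
  if st.2.1 ≥ 0 then (points, st.2.1 - 2 * dx + 2 * dy, st.2.2 + 1)
  else (points, st.2.1 + 2 * dy, st.2.2)

def supercover_line (x0 : Int) (y0 : Int) (x1 : Int) (y1 : Int) : List (Int × Int) :=
  let xsign : Int := if x1 - x0 > 0 then 1 else -1
  let ysign : Int := if y1 - y0 > 0 then 1 else -1
  let dxa := |x1 - x0|
  let dya := |y1 - y0|
  if dxa > dya then
    ((PySem.List.pyRange 0 (dxa + 1) 1).foldl
      (pvAstep x0 y0 xsign 0 0 ysign dxa dya) ([], 2 * dya - dxa, 0)).1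
  else
    ((PySem.List.pyRange 0 (dya + 1) 1).foldl
      (pvAstep x0 y0 0 ysign xsign 0 dya dxa) ([], 2 * dxa - dya, 0)).1

-- ===== PORT B =====
-- closed-form transverse coordinate: (2*x*dy + dx) // (2*dx)
def pvBy (dx dy x : Int) : Int := PySem.Int.floordiv (2 * x * dy + dx) (2 * dx)

def pvBpoint (x0 y0 xx xy yx yy dx dy x : Int) : Int × Int :=
  (x0 + x * xx + pvBy dx dy x * yx, y0 + x * xy + pvBy dx dy x * yy)

def supercover_line_alt (x0 : Int) (y0 : Int) (x1 : Int) (y1 : Int) : List (Int × Int) :=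
  let xsign : Int := if x1 - x0 > 0 then 1 else -1
  let ysign : Int := if y1 - y0 > 0 then 1 else -1
  let dxa := |x1 - x0|
  let dya := |y1 - y0|
  if dxa > dya then
    if dxa = 0 then [(x0, y0)]
    else (PySem.List.pyRange 0 (dxa + 1) 1).map (pvBpoint x0 y0 xsign 0 0 ysign dxa dya)
  else
    if dya = 0 then [(x0, y0)]
    else (PySem.List.pyRange 0 (dya + 1) 1).map (pvBpoint x0 y0 0 ysign xsign 0 dya dxa)

-- ===== PRECONDITION & SPEC =====
def Spec_supercover_line (x0 : Int) (y0 : Int) (x1 : Int) (y1 : Int) (out : List (Int × Int)) : Prop := out = supercover_line_alt x0 y0 x1 y1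
instance (x0 : Int) (y0 : Int) (x1 : Int) (y1 : Int) (out : List (Int × Int)) : Decidable (Spec_supercover_line x0 y0 x1 y1 out) := by unfold Spec_supercover_line; infer_instance

-- ===== CLAIM (what is proved, stated in full; the proofs are below) =====
def Claim_equal_supercover_line : Prop := ∀ (x0 : Int) (y0 : Int) (x1 : Int) (y1 : Int), Dom_supercover_line x0 y0 x1 y1 → Spec_supercover_line x0 y0 x1 y1 (supercover_line x0 y0 x1 y1)

-- ===== LEMMAS AND PROOFS =====

lemma pvBy_zero (dx dy : Int) (hdx : 0 < dx) : pvBy dx dy 0 = 0 := by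
  unfold pvBy
  rw [PySem.Int.floordiv_eq_iff_of_pos (by omega)]
  constructor <;> omega

-- closed-form y advances exactly when Bresenham's error term is nonnegative
lemma pvBy_succ (dx dy n : Int) (hdx : 0 < dx) (hdy0 : 0 ≤ dy) (hdydx : dy ≤ dx) :
    pvBy dx dy (n + 1) =
      if 2 * (n + 1) * dy - dx - 2 * dx * pvBy dx dy n ≥ 0
      then pvBy dx dy n + 1 else pvBy dx dy n := by
  have hm : (0:Int) < 2 * dx := by omega
  have hdecomp := PySem.Int.floordiv_mul_add_mod (2 * n * dy + dx) (2 * dx)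
  have h0 : 0 ≤ (2 * n * dy + dx) % (2 * dx) := Int.emod_nonneg _ (by omega)
  have h1 : (2 * n * dy + dx) % (2 * dx) < 2 * dx := Int.emod_lt_of_pos _ hm
  set y := pvBy dx dy n with hy
  set r := (2 * n * dy + dx) % (2 * dx) with hr
  have hmod : PySem.Int.mod (2 * n * dy + dx) (2 * dx) = r := by
    rw [hr]; exact PySem.Int.mod_eq_emod_of_pos hm
  rw [hmod] at hdecomp
  have hpv : y * (2 * dx) + r = 2 * n * dy + dx := by rw [hy]; exact hdecomp
  -- a(n+1) = 2*(n+1)*dy + dx = y*(2dx) + r + 2dy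
  have ha : 2 * (n + 1) * dy + dx = y * (2 * dx) + (r + 2 * dy) := by
    linear_combination -hpv
  have hD : (2 * (n + 1) * dy - dx - 2 * dx * y ≥ 0) ↔ (2 * dx ≤ r + 2 * dy) := by
    constructor <;> intro h <;> nlinarith [hpv]
  by_cases hc : 2 * dx ≤ r + 2 * dy
  · rw [if_pos (hD.mpr hc)]
    unfold pvBy
    rw [PySem.Int.floordiv_eq_iff_of_pos hm]
    constructor <;> nlinarith [ha]
  · rw [if_neg (fun h => hc (hD.mp h))]
    unfold pvBy
    rw [PySem.Int.floordiv_eq_iff_of_pos hm]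
    constructor <;> nlinarith [ha]

-- loop invariant: after folding range(0,n), points = closed-form map, y = pvBy n,
-- D = 2*(n+1)*dy - dx - 2*dx*y
lemma pvLoop_closed (x0 y0 xx xy yx yy dx dy : Int) (hdx : 0 < dx) (hdy0 : 0 ≤ dy)
    (hdydx : dy ≤ dx) (n : Nat) :
    (PySem.List.pyRange 0 (n : Int) 1).foldl
        (pvAstep x0 y0 xx xy yx yy dx dy) ([], 2 * dy - dx, 0)
      = ((PySem.List.pyRange 0 (n : Int) 1).map (pvBpoint x0 y0 xx xy yx yy dx dy),
         2 * ((n : Int) + 1) * dy - dx - 2 * dx * pvBy dx dy (n : Int),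
         pvBy dx dy (n : Int)) := by
  induction n with
  | zero =>
      simp [pvBy_zero dx dy hdx]
  | succ k ih =>
      have hsplit : PySem.List.pyRange 0 ((k : Int) + 1) 1
          = PySem.List.pyRange 0 (k : Int) 1 ++ [(k : Int)] :=
        PySem.List.pyRange_one_succ_right (by positivity)
      have hcast : ((k + 1 : Nat) : Int) = (k : Int) + 1 := by push_cast; ring
      rw [hcast, hsplit, List.foldl_append, List.map_append, ih]
      have hsuc := pvBy_succ dx dy (k : Int) hdx hdy0 hdydx
      by_cases hD : 2 * ((k : Int) + 1) * dy - dx - 2 * dx * pvBy dx dy (k : Int) ≥ 0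
      · rw [if_pos hD] at hsuc
        simp only [pvAstep, List.foldl_cons, List.foldl_nil, if_pos hD]
        refine Prod.ext ?_ (Prod.ext ?_ ?_) <;> simp [pvBpoint, hsuc] <;> ring
      · rw [if_neg hD] at hsuc
        simp only [pvAstep, List.foldl_cons, List.foldl_nil, if_neg hD]
        refine Prod.ext ?_ (Prod.ext ?_ ?_) <;> simp [pvBpoint, hsuc] <;> ring

-- the degenerate loop (dx = dy = 0): one iteration appending (x0, y0)
lemma pvLoop_degen (x0 y0 xx xy yx yy : Int) :
    ((PySem.List.pyRange 0 (0 + 1) 1).foldl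
        (pvAstep x0 y0 xx xy yx yy 0 0) ([], 2 * 0 - 0, 0)).1 = [(x0, y0)] := by
  have : PySem.List.pyRange 0 (0 + 1) 1 = [0] := by
    rw [PySem.List.pyRange_one_cons (by norm_num), PySem.List.pyRange_one_eq_nil (by norm_num)]
  rw [this]
  simp [pvAstep]

lemma pvBranch_eq (x0 y0 xx xy yx yy dx dy : Int) (hdx : 0 < dx) (hdy0 : 0 ≤ dy)
    (hdydx : dy ≤ dx) :
    ((PySem.List.pyRange 0 (dx + 1) 1).foldl
        (pvAstep x0 y0 xx xy yx yy dx dy) ([], 2 * dy - dx, 0)).1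
      = (PySem.List.pyRange 0 (dx + 1) 1).map (pvBpoint x0 y0 xx xy yx yy dx dy) := by
  have hcast : ((dx + 1).toNat : Int) = dx + 1 := by omega
  rw [← hcast, pvLoop_closed x0 y0 xx xy yx yy dx dy hdx hdy0 hdydx]

-- ===== VERDICT (by name: the statement is the Claim_ definition above) =====
theorem supercover_line_spec : Claim_equal_supercover_line := by
  intro x0 y0 x1 y1 _
  unfold Spec_supercover_line supercover_line supercover_line_alt
  set xsign : Int := if x1 - x0 > 0 then 1 else -1 with hxs
  set ysign : Int := if y1 - y0 > 0 then 1 else -1 with hys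
  have hdxa : 0 ≤ |x1 - x0| := abs_nonneg _
  have hdya : 0 ≤ |y1 - y0| := abs_nonneg _
  by_cases hgt : |x1 - x0| > |y1 - y0|
  · simp only [if_pos hgt, if_neg (by omega : ¬ |x1 - x0| = 0)]
    exact pvBranch_eq x0 y0 xsign 0 0 ysign _ _ (by omega) hdya (by omega)
  · simp only [if_neg hgt]
    by_cases hz : |y1 - y0| = 0
    · rw [if_pos hz, hz]
      have hx0 : |x1 - x0| = 0 := by omega
      rw [hx0]
      exact pvLoop_degen x0 y0 0 ysign xsign 0
    · rw [if_neg hz]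
      exact pvBranch_eq x0 y0 0 ysign xsign 0 _ _ (by omega) hdxa (by omega)
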